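-- pv_equiv track=rewrite | github.com/wojciechGaudnik/CodeWars | Python/kyu7ConcatenatedSum.py | check_concatenated_sum
-- ===== SOURCE A (Python) =====
-- def check_concatenated_sum(param, param1):
--     answer = 0
--     if str(param)[0] == '-':
--         for one in str(param)[1:]:
--             answer -= int(str(one) * param1)
--         return answer == param
--     else:
--         for one in str(param):
--             answer += int(str(one) * param1)
--         return answer == param
-- ===== SOURCE B (Python) =====
-- def check_concatenated_sum(param, param1):
--     sign = -1 if param < 0 else 1
--     n = abs(param)
--     total = 0
--     while n:
--         total += n % 10
--         n //= 10
--     repunit = (10 ** param1 - 1) // 9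
--     return sign * total * repunit == param
-- ===== Notes on version B (the rewrite author's own statement) =====
-- stated objective: faster
-- what changed: Replaces the per-digit string-repetition loop (int(str(d)*param1) concatenations) with pure arithmetic: digit sum extracted by %10 // 10 on abs(param), multiplied by the closed-form repunit (10**param1 - 1)//9.
import Mathlib
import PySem

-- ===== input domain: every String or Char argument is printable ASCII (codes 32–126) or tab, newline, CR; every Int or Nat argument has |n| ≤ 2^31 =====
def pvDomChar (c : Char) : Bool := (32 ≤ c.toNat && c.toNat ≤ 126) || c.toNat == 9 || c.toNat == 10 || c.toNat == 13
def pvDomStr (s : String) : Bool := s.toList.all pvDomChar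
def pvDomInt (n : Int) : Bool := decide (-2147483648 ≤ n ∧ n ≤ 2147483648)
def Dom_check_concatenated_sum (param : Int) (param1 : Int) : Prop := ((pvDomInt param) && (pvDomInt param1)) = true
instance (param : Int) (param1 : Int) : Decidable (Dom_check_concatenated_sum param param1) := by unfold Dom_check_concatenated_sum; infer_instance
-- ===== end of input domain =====

-- B replaces A's per-digit string-repetition loop by arithmetic: digit sum (via %10, //10) times
-- the closed-form repunit (10^param1 - 1) // 9; same Boolean result on param1 >= 1 (A raises otherwise).


-- ===== PORT A =====
-- hand port of Python's  int(str(one) * param1)  for the digit chars `one` of str(param) and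
-- param1 ≥ 1 (all inputs admitted by Pre_): int() of a nonempty all-digit string is exactly this
-- left fold over its characters (PySem.Int.ofChars? computes the same value there; the explicit
-- fold is used because the repeated-digit string is the object A builds).
def pvIntOfRepeated (one : Char) (k : Nat) : Int :=
  (List.replicate k one).foldl (fun a c => a * 10 + ((c.toNat : Int) - ('0'.toNat : Int))) 0

def check_concatenated_sum (param : Int) (param1 : Int) : Bool :=
  -- answer = 0; if str(param)[0] == '-': subtract over str(param)[1:] else add over str(param)
  let s := PySem.Int.toChars param
  if PySem.List.pyGet? s 0 = some '-' then
    let answer := (PySem.List.slice s (some 1) none).foldl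
      (fun answer one => answer - pvIntOfRepeated one param1.toNat) 0
    decide (answer = param)
  else
    let answer := s.foldl (fun answer one => answer + pvIntOfRepeated one param1.toNat) 0
    decide (answer = param)

-- ===== PORT B =====
-- while n: total += n % 10; n //= 10   (n = abs(param) ≥ 0, so Nat recursion is exact)
def pvDigitSum (n : Nat) : Int :=
  if n = 0 then 0 else (↑(n % 10) : Int) + pvDigitSum (n / 10)
decreasing_by exact Nat.div_lt_self (by omega) (by omega)

def check_concatenated_sum_alt (param : Int) (param1 : Int) : Bool :=
  let sign : Int := if param < 0 then -1 else 1
  let total := pvDigitSum param.natAbs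
  -- (10 ** param1 - 1) // 9 ; exact for param1 ≥ 0 (Pre_ gives param1 ≥ 1)
  let repunit := PySem.Int.floordiv (10 ^ param1.toNat - 1) 9
  decide (sign * total * repunit = param)

-- ===== PRECONDITION & SPEC =====
-- Pre_ excludes exactly param1 ≤ 0, where A raises ValueError (int('') on the empty repeated string).
def Pre_check_concatenated_sum (param : Int) (param1 : Int) : Prop := 1 ≤ param1
instance (param : Int) (param1 : Int) : Decidable (Pre_check_concatenated_sum param param1) := by unfold Pre_check_concatenated_sum; infer_instance
def pvWitness_check_concatenated_sum : Int × Int := (-12, 2)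

def Spec_check_concatenated_sum (param : Int) (param1 : Int) (out : Bool) : Prop := out = check_concatenated_sum_alt param param1
instance (param : Int) (param1 : Int) (out : Bool) : Decidable (Spec_check_concatenated_sum param param1 out) := by unfold Spec_check_concatenated_sum; infer_instance

-- ===== CLAIM (what is proved, stated in full; the proofs are below) =====
def Claim_equal_check_concatenated_sum : Prop := ∀ (param : Int) (param1 : Int), Dom_check_concatenated_sum param param1 → Pre_check_concatenated_sum param param1 → Spec_check_concatenated_sum param param1 (check_concatenated_sum param param1)
-- ===== LEMMAS AND PROOFS =====

-- repunit, in the recursive form the inductions need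
def pvRep : Nat → Int
  | 0 => 0
  | k + 1 => 10 ^ k + pvRep k

theorem pvRep_nine (k : Nat) : 9 * pvRep k = 10 ^ k - 1 := by
  induction k with
  | zero => simp [pvRep]
  | succ k ih => simp only [pvRep, pow_succ]; ring_nf; ring_nf at ih; omega

theorem pv_floordiv_rep (k : Nat) : PySem.Int.floordiv (10 ^ k - 1) 9 = pvRep k := by
  rw [PySem.Int.floordiv_eq_ediv_of_pos (by omega), ← pvRep_nine k]
  exact Int.mul_ediv_cancel_left _ (by omega)

theorem pvIntOfRepeated_eq (one : Char) (k : Nat) :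
    pvIntOfRepeated one k = ((one.toNat : Int) - ('0'.toNat : Int)) * pvRep k := by
  suffices h : ∀ (k : Nat) (a : Int), (List.replicate k one).foldl
      (fun a c => a * 10 + ((c.toNat : Int) - ('0'.toNat : Int))) a
      = a * 10 ^ k + ((one.toNat : Int) - ('0'.toNat : Int)) * pvRep k by
    simpa [pvIntOfRepeated] using h k 0
  intro k
  induction k with
  | zero => intro a; simp [pvRep]
  | succ k ih =>
      intro a
      rw [List.replicate_succ, List.foldl_cons, ih]
      simp only [pvRep, pow_succ]
      ring

theorem pv_digitChar_val (d : Nat) (h : d < 10) :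
    ((Nat.digitChar d).toNat : Int) - ('0'.toNat : Int) = (d : Int) := by
  interval_cases d <;> rfl

theorem pvDigitSum_lt (n : Nat) (h : n < 10) : pvDigitSum n = (n : Int) := by
  unfold pvDigitSum
  rcases Nat.eq_zero_or_pos n with h0 | h0
  · simp [h0]
  · rw [if_neg (by omega), Nat.mod_eq_of_lt h, Nat.div_eq_of_lt h]
    unfold pvDigitSum; simp

-- A's accumulation over the decimal digits equals digit-sum times R, for any fold seed
theorem pv_fold_digits (R : Int) (n : Nat) :
    ∀ a : Int, (Nat.toDigits 10 n).foldl
      (fun answer one => answer + ((one.toNat : Int) - ('0'.toNat : Int)) * R) a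
      = a + pvDigitSum n * R := by
  induction n using Nat.strong_induction_on with
  | _ n ih =>
    intro a
    by_cases h : n < 10
    · rw [Nat.toDigits_of_lt_base h]
      simp only [List.foldl_cons, List.foldl_nil]
      rw [pv_digitChar_val n h, pvDigitSum_lt n h]
    · rw [Nat.toDigits_of_base_le (by omega) (by omega), List.foldl_append,
        ih (n / 10) (Nat.div_lt_self (by omega) (by omega)) a]
      simp only [List.foldl_cons, List.foldl_nil]
      rw [pv_digitChar_val (n % 10) (Nat.mod_lt n (by omega))]
      have h10 : pvDigitSum n = (↑(n % 10) : Int) + pvDigitSum (n / 10) := by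
        rw [pvDigitSum]; exact if_neg (by omega)
      rw [h10]
      ring

-- the subtracting fold, reduced to the adding one
theorem pv_fold_digits_sub (R : Int) (n : Nat) :
    (Nat.toDigits 10 n).foldl
      (fun answer one => answer - ((one.toNat : Int) - ('0'.toNat : Int)) * R) 0
      = -(pvDigitSum n * R) := by
  have h : ∀ (l : List Char) (a : Int),
      l.foldl (fun answer one => answer - ((one.toNat : Int) - ('0'.toNat : Int)) * R) a
      = -(l.foldl (fun answer one => answer + ((one.toNat : Int) - ('0'.toNat : Int)) * R) (-a)) := by
    intro l
    induction l with
    | nil => simp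
    | cons c t iht =>
        intro a
        rw [List.foldl_cons, List.foldl_cons, iht]
        have hseed : ∀ x : Int, -(a - x) = -a + x := by intro x; ring
        rw [hseed]
  rw [h, pv_fold_digits R n (-0)]; ring

theorem pv_head_not_dash (n : Nat) :
    PySem.List.pyGet? (Nat.toDigits 10 n) 0 ≠ some '-' := by
  intro hcontra
  rw [PySem.List.pyGet?_zero] at hcontra
  have hc : '-' ∈ Nat.toDigits 10 n := List.mem_of_getElem? hcontra
  have hd := Nat.isDigit_of_mem_toDigits (b := 10) (by omega) (by omega) hc
  exact absurd hd (by decide)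

-- ===== VERDICT (by name: the statement is the Claim_ definition above) =====
theorem check_concatenated_sum_spec : Claim_equal_check_concatenated_sum := by
  intro param param1 _hdom _hpre
  unfold Spec_check_concatenated_sum check_concatenated_sum check_concatenated_sum_alt
  simp only [PySem.Int.toChars, pv_floordiv_rep]
  by_cases hneg : param < 0
  · simp only [if_pos hneg, PySem.List.pyGet?_zero_cons, PySem.List.slice_from_one,
      List.tail_cons]
    rw [if_pos trivial]
    simp only [pvIntOfRepeated_eq, pv_fold_digits_sub]
    have hsg : (-1 : Int) * pvDigitSum param.natAbs * pvRep param1.toNat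
        = -(pvDigitSum param.natAbs * pvRep param1.toNat) := by ring
    simp only [hsg]
  · simp only [if_neg hneg]
    rw [if_neg (pv_head_not_dash param.toNat)]
    simp only [pvIntOfRepeated_eq, pv_fold_digits, zero_add, one_mul]
    have habs : param.natAbs = param.toNat := by omega
    simp only [habs]
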